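-- pv_equiv track=rewrite | github.com/ThenScu/ThucHanhTriTueNhanTao | VuThienTruong_2001231015_Tuan3/alphabeta_pygame.py | check_winner_n
-- ===== SOURCE A (Python) =====
-- def check_winner_n(board, n, win_len):
--     """
--     [THUẬT TOÁN VÉT CẠN - BRUTE FORCE]
--     Kiểm tra xem đã có ai thắng chưa trên bàn cờ kích thước n.
--     Độ phức tạp: O(n^2)
--     """
--     # Hàm con để lấy giá trị tại hàng r, cột c từ mảng 1 chiều
--     def at(r, c):
--         return board[r * n + c]
--
--     # Định nghĩa 4 hướng kiểm tra: Ngang, Dọc, Chéo chính, Chéo phụ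
--     #
--     directions = [(0, 1), (1, 0), (1, 1), (1, -1)]
--
--     # Duyệt qua từng ô trên bàn cờ
--     for r in range(n):
--         for c in range(n):
--             player = at(r, c)
--             # Chỉ kiểm tra nếu ô đó đã được đánh (là X hoặc O)
--             if player != 'X' and player != 'O':
--                 continue
--
--             # Tại mỗi ô, kiểm tra loang ra theo 4 hướng
--             for dr, dc in directions:
--                 cnt = 1 # Đếm số quân liên tiếp (bắt đầu là 1 vì tính cả ô hiện tại)
--                 rr, cc = r + dr, c + dc
--
--                 # Vòng lặp kiểm tra các ô kế tiếp theo hướng (dr, dc)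
--                 while 0 <= rr < n and 0 <= cc < n and at(rr, cc) == player:
--                     cnt += 1
--                     if cnt >= win_len: # Nếu đủ số lượng thắng -> Return ngay
--                         return player
--                     rr += dr
--                     cc += dc
--     return None
-- ===== SOURCE B (Python) =====
-- def check_winner_n(board, n, win_len):
--     """Dynamic programming: precompute, per direction, a run-length table
--     cnt[idx] = length of the run of identical X/O cells starting at idx going
--     that direction (filled in reverse scan order so the recurrence is ready);
--     then one forward pass returns the first cell/direction whose run reaches
--     win_len (same priority order as a cell-by-cell walk)."""
--     if n <= 0:
--         return None
--     size = n * n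
--     directions = ((0, 1), (1, 0), (1, 1), (1, -1))
--     tables = []
--     for dr, dc in directions:
--         cnt = [0] * size
--         for idx in reversed(range(size)):
--             cell = board[idx]
--             if cell == 'X' or cell == 'O':
--                 r, c = divmod(idx, n)
--                 rr, cc = r + dr, c + dc
--                 if 0 <= rr < n and 0 <= cc < n and board[rr * n + cc] == cell:
--                     cnt[idx] = 1 + cnt[rr * n + cc]
--                 else:
--                     cnt[idx] = 1
--         tables.append(cnt)
--     for idx in range(size):
--         cell = board[idx]
--         if cell == 'X' or cell == 'O':
--             for cnt in tables:
--                 if cnt[idx] >= win_len: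
--                     return cell
--     return None
-- ===== Notes on version B (the rewrite author's own statement) =====
-- stated objective: alternative
-- what changed: A walks outward from every player cell with a while-loop counter (a fresh walk per cell and direction); B first builds, per direction, a dynamic-programming run-length table filled in reverse scan order (cnt[idx] = 1 + cnt[next] when the neighbour matches), then a second forward pass just compares the precomputed table entries against win_len, so no per-cell walk remains.
-- outside the precondition, e.g. on check_winner_n(['X', 'X'], 2, 2): A returns 'X', B raises IndexError; on check_winner_n(['X', 'O', 'O', 'O'], 2, 1): A returns 'O', B returns 'X'
import Mathlib
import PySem

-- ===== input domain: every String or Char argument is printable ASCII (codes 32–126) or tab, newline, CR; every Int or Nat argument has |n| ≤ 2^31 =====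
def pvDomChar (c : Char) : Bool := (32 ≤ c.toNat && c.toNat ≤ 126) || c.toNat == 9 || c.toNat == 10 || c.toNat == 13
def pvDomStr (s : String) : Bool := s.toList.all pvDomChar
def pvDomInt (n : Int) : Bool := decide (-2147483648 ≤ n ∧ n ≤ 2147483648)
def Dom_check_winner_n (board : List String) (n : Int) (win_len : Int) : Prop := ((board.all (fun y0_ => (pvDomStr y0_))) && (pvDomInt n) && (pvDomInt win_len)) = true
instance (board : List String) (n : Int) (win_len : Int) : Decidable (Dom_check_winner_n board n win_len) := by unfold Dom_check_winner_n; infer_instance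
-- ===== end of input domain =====

-- B replaces A's per-cell while-loop walks by a staged dynamic-programming pass: per direction a
-- run-length table filled in reverse scan order, then a forward pass comparing table entries with
-- win_len; same result and same first-detection priority (objective: alternative algorithm).

-- ===== PORT A =====
-- board[r * n + c]  (indices are always ≥ 0 here; Pre_ keeps them in range)
def pvAt (board : List String) (n r c : Int) : String :=
  (PySem.List.pyGet? board (r * n + c)).getD ""

def pvDirsA : List (Int × Int) := [(0, 1), (1, 0), (1, 1), (1, -1)]

-- the inner 'while 0 <= rr < n and 0 <= cc < n and at(rr, cc) == player' loop of A;
-- fuel bounds the iteration count (the loop runs at most n times; fuel is ample under Pre_)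
def pvWhileA (board : List String) (n win_len : Int) (player : String) (dr dc : Int) :
    Nat → Int → Int → Int → Option String
  | 0, _, _, _ => none
  | fuel + 1, cnt, rr, cc =>
    if 0 ≤ rr ∧ rr < n ∧ 0 ≤ cc ∧ cc < n ∧ pvAt board n rr cc = player then
      if win_len ≤ cnt + 1 then some player
      else pvWhileA board n win_len player dr dc fuel (cnt + 1) (rr + dr) (cc + dc)
    else none

def pvCellA (board : List String) (n win_len r c : Int) : Option String :=
  let player := pvAt board n r c
  if player ≠ "X" ∧ player ≠ "O" then none
  else pvDirsA.findSome? fun d =>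
    pvWhileA board n win_len player d.1 d.2 (win_len.toNat + n.toNat + 1) 1 (r + d.1) (c + d.2)

def check_winner_n (board : List String) (n : Int) (win_len : Int) : Option String :=
  (PySem.List.pyRange 0 n 1).findSome? fun r =>
    (PySem.List.pyRange 0 n 1).findSome? fun c =>
      pvCellA board n win_len r c

-- ===== PORT B =====
-- one iteration of B's reverse fill loop: cnt[idx] = 1 + cnt[next] if the neighbour matches, else 1
def pvStepB (board : List String) (n dr dc : Int) (cnt : List Int) (idx : Nat) : List Int :=
  let cell := (PySem.List.pyGet? board (idx : Int)).getD ""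
  if cell = "X" ∨ cell = "O" then
    let rr := PySem.Int.floordiv (idx : Int) n + dr
    let cc := PySem.Int.mod (idx : Int) n + dc
    if 0 ≤ rr ∧ rr < n ∧ 0 ≤ cc ∧ cc < n ∧ (PySem.List.pyGet? board (rr * n + cc)).getD "" = cell then
      cnt.set idx (1 + cnt.getD (rr * n + cc).toNat 0)
    else
      cnt.set idx 1
  else cnt

-- 'for idx in reversed(range(size)): …' building one direction's run-length table
def pvTableB (board : List String) (n dr dc : Int) : List Int :=
  ((List.range (n * n).toNat).reverse).foldl (pvStepB board n dr dc)
    (List.replicate (n * n).toNat 0)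

-- body of B's second (forward) pass at one flat index
def pvCellB (board : List String) (win_len : Int) (tables : List (List Int)) (idx : Nat) :
    Option String :=
  let cell := (PySem.List.pyGet? board (idx : Int)).getD ""
  if cell = "X" ∨ cell = "O" then
    tables.findSome? fun cnt => if win_len ≤ cnt.getD idx 0 then some cell else none
  else none

def check_winner_n_alt (board : List String) (n : Int) (win_len : Int) : Option String :=
  if n ≤ 0 then none
  else
    let tables := ([(0, 1), (1, 0), (1, 1), (1, -1)] : List (Int × Int)).map
      fun d => pvTableB board n d.1 d.2
    (List.range (n * n).toNat).findSome? fun idx => pvCellB board win_len tables idx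

-- ===== PRECONDITION & SPEC =====
-- Pre_ restricts to the natural domain of the game: either a non-positive dimension (empty board,
-- both programs return None) or a positive dimension n with a fully allocated n*n board (A raises
-- IndexError on shorter boards unless a win happens first, and B's table build always reads every
-- cell) and a winning length of at least 2 (a winning length of 0 or 1 is degenerate and no caller
-- uses it; A's counter only tests win_len after a second cell is seen).
def Pre_check_winner_n (board : List String) (n : Int) (win_len : Int) : Prop :=
  n ≤ 0 ∨ (0 < n ∧ n * n ≤ (board.length : Int) ∧ 2 ≤ win_len)
instance (board : List String) (n : Int) (win_len : Int) : Decidable (Pre_check_winner_n board n win_len) := by unfold Pre_check_winner_n; infer_instance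

def pvWitness_check_winner_n : List String × Int × Int := (["X", "O", "", "X"], 2, 2)

def Spec_check_winner_n (board : List String) (n : Int) (win_len : Int) (out : Option String) : Prop := out = check_winner_n_alt board n win_len
instance (board : List String) (n : Int) (win_len : Int) (out : Option String) : Decidable (Spec_check_winner_n board n win_len out) := by unfold Spec_check_winner_n; infer_instance

-- ===== CLAIM (what is proved, stated in full; the proofs are below) =====
def Claim_equal_check_winner_n : Prop := ∀ (board : List String) (n : Int) (win_len : Int), Dom_check_winner_n board n win_len → Pre_check_winner_n board n win_len → Spec_check_winner_n board n win_len (check_winner_n board n win_len)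

-- ===== LEMMAS AND PROOFS =====

-- the k-th cell from (r,c) in direction (dr,dc) is on the board and holds `cell`
def pvGood (board : List String) (n r c dr dc : Int) (cell : String) (k : Int) : Prop :=
  0 ≤ r + k * dr ∧ r + k * dr < n ∧ 0 ≤ c + k * dc ∧ c + k * dc < n ∧
    pvAt board n (r + k * dr) (c + k * dc) = cell

def pvDirOk (dr dc : Int) : Prop :=
  (dr = 0 ∧ dc = 1) ∨ (dr = 1 ∧ dc = 0) ∨ (dr = 1 ∧ dc = 1) ∨ (dr = 1 ∧ dc = -1)

theorem pvGood_shift (board : List String) (n r c dr dc : Int) (cell : String) (k : Int) :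
    pvGood board n r c dr dc cell (k + 1) ↔ pvGood board n (r + dr) (c + dc) dr dc cell k := by
  unfold pvGood
  rw [show r + (k + 1) * dr = r + dr + k * dr from by ring,
      show c + (k + 1) * dc = c + dc + k * dc from by ring]

theorem pvModBounds (n a : Int) (hn : 0 < n) :
    0 ≤ PySem.Int.mod a n ∧ PySem.Int.mod a n < n := by
  rw [PySem.Int.mod_eq_emod_of_pos hn]
  exact ⟨Int.emod_nonneg a (by omega), Int.emod_lt_of_pos a hn⟩

theorem pvDecomp (n x y : Int) (hn : 0 < n) (hy0 : 0 ≤ y) (hyn : y < n) :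
    PySem.Int.floordiv (x * n + y) n = x ∧ PySem.Int.mod (x * n + y) n = y := by
  have hd : PySem.Int.floordiv (x * n + y) n = x := by
    rw [PySem.Int.floordiv_eq_iff_of_pos hn]
    constructor
    · linarith
    · have : (x + 1) * n = x * n + n := by ring
      linarith
  refine ⟨hd, ?_⟩
  have h := PySem.Int.floordiv_mul_add_mod (x * n + y) n
  rw [hd] at h
  linarith

theorem pvNext_bounds (n dr dc a : Int) (hn : 0 < n) (hd : pvDirOk dr dc) (_ha : 0 ≤ a)
    (h1 : 0 ≤ PySem.Int.floordiv a n + dr) (h2 : PySem.Int.floordiv a n + dr < n)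
    (h3 : 0 ≤ PySem.Int.mod a n + dc) (h4 : PySem.Int.mod a n + dc < n) :
    a < (PySem.Int.floordiv a n + dr) * n + (PySem.Int.mod a n + dc) ∧
      (PySem.Int.floordiv a n + dr) * n + (PySem.Int.mod a n + dc) < n * n := by
  have heq := PySem.Int.floordiv_mul_add_mod a n
  have hm := pvModBounds n a hn
  set r := PySem.Int.floordiv a n with hr
  set c := PySem.Int.mod a n with hc
  constructor
  · have hexp : (r + dr) * n + (c + dc) = a + (dr * n + dc) := by
      rw [← heq]; ring
    rw [hexp]
    rcases hd with ⟨e1, e2⟩ | ⟨e1, e2⟩ | ⟨e1, e2⟩ | ⟨e1, e2⟩ <;> subst e1 <;> subst e2 <;>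
      simp only [zero_mul, one_mul] <;> omega
  · have hub : (r + dr) * n ≤ (n - 1) * n :=
      mul_le_mul_of_nonneg_right (by omega) (by omega)
    nlinarith

theorem pvStepB_length (board : List String) (n dr dc : Int) (cnt : List Int) (i : Nat) :
    (pvStepB board n dr dc cnt i).length = cnt.length := by
  simp only [pvStepB]
  split_ifs <;> simp

theorem pvStepB_getD_ne (board : List String) (n dr dc : Int) (cnt : List Int) (i j : Nat)
    (h : i ≠ j) : (pvStepB board n dr dc cnt j).getD i 0 = cnt.getD i 0 := by
  simp only [pvStepB]
  split_ifs <;> simp [List.getD, h.symm]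

-- the recurrence B's fill loop establishes, stated over the final table `out`
-- (`cnt` is the initial table, read back on non-player cells)
def pvRecRHS (board : List String) (n dr dc : Int) (out cnt : List Int) (i : Nat) : Int :=
  let cell := (PySem.List.pyGet? board (i : Int)).getD ""
  if cell = "X" ∨ cell = "O" then
    let rr := PySem.Int.floordiv (i : Int) n + dr
    let cc := PySem.Int.mod (i : Int) n + dc
    if 0 ≤ rr ∧ rr < n ∧ 0 ≤ cc ∧ cc < n ∧ (PySem.List.pyGet? board (rr * n + cc)).getD "" = cell then
      1 + out.getD (rr * n + cc).toNat 0
    else 1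
  else cnt.getD i 0

theorem pvBuild_aux (board : List String) (n dr dc : Int) (hn : 0 < n) (hd : pvDirOk dr dc) :
    ∀ (j : Nat) (cnt : List Int), cnt.length = (n * n).toNat → j ≤ (n * n).toNat →
      (∀ i : Nat, j ≤ i →
        (((List.range j).reverse).foldl (pvStepB board n dr dc) cnt).getD i 0 = cnt.getD i 0) ∧
      (∀ i : Nat, i < j →
        (((List.range j).reverse).foldl (pvStepB board n dr dc) cnt).getD i 0 =
          pvRecRHS board n dr dc
            (((List.range j).reverse).foldl (pvStepB board n dr dc) cnt) cnt i) := by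
  intro j
  induction j with
  | zero => intro cnt _ _; exact ⟨fun i _ => by simp, fun i hi => absurd hi (by omega)⟩
  | succ j ih =>
    intro cnt hlen hjs
    have hrev : (List.range (j + 1)).reverse = j :: (List.range j).reverse := by
      rw [List.range_succ, List.reverse_append]; rfl
    set cnt' := pvStepB board n dr dc cnt j with hcnt'
    have hfold : ((List.range (j + 1)).reverse).foldl (pvStepB board n dr dc) cnt =
        ((List.range j).reverse).foldl (pvStepB board n dr dc) cnt' := by
      rw [hrev]; rfl
    have hlen' : cnt'.length = (n * n).toNat := by
      rw [hcnt', pvStepB_length]; exact hlen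
    obtain ⟨ih1, ih2⟩ := ih cnt' hlen' (by omega)
    rw [hfold]
    set out := ((List.range j).reverse).foldl (pvStepB board n dr dc) cnt' with hout
    constructor
    · intro i hi
      rw [ih1 i (by omega), hcnt', pvStepB_getD_ne board n dr dc cnt i j (by omega)]
    · intro i hi
      rcases Nat.lt_or_ge i j with hij | hij
      · -- i < j: the recurrence from the tail fold, with the base read moved from cnt' to cnt
        rw [ih2 i hij]
        simp only [pvRecRHS]
        split_ifs with hp hok
        · rfl
        · rfl
        · exact pvStepB_getD_ne board n dr dc cnt i j (by omega)
      · -- i = j: position j was just written by pvStepB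
        have hij' : i = j := by omega
        subst hij'
        have hji : (i : Int) ≥ 0 := by positivity
        rw [ih1 i (by omega), hcnt']
        simp only [pvStepB, pvRecRHS]
        split_ifs with hp hok
        · -- player cell, neighbour matches
          have hnb := pvNext_bounds n dr dc (i : Int) hn hd hji hok.1 hok.2.1 hok.2.2.1 hok.2.2.2.1
          set nxt : Int :=
            (PySem.Int.floordiv (i : Int) n + dr) * n + (PySem.Int.mod (i : Int) n + dc) with hnxt
          have hnxt0 : 0 ≤ nxt := by omega
          have hgt : i < nxt.toNat := by omega
          have hset : (cnt.set i (1 + cnt.getD nxt.toNat 0)).getD i 0 =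
              1 + cnt.getD nxt.toNat 0 := by
            simp [List.getD, show i < cnt.length by omega]
          rw [hset]
          have : out.getD nxt.toNat 0 = cnt.getD nxt.toNat 0 := by
            rw [ih1 nxt.toNat (by omega), hcnt',
              pvStepB_getD_ne board n dr dc cnt nxt.toNat i (by omega)]
          rw [this]
        · -- player cell, run of length 1
          simp [List.getD, show i < cnt.length by omega]
        · rfl

theorem pvFoldl_length (board : List String) (n dr dc : Int) :
    ∀ (l : List Nat) (cnt : List Int),
      (l.foldl (pvStepB board n dr dc) cnt).length = cnt.length
  | [], _ => rfl
  | a :: t, cnt => by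
    rw [List.foldl_cons, pvFoldl_length board n dr dc t, pvStepB_length]

theorem pvTableB_length (board : List String) (n dr dc : Int) :
    (pvTableB board n dr dc).length = (n * n).toNat := by
  unfold pvTableB
  rw [pvFoldl_length]
  simp

theorem pvTable_rec (board : List String) (n dr dc : Int) (hn : 0 < n) (hd : pvDirOk dr dc)
    (i : Nat) (hi : i < (n * n).toNat) :
    (pvTableB board n dr dc).getD i 0 =
      pvRecRHS board n dr dc (pvTableB board n dr dc) (List.replicate (n * n).toNat 0) i := by
  have h := pvBuild_aux board n dr dc hn hd (n * n).toNat (List.replicate (n * n).toNat 0)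
    (by simp) (le_refl _)
  exact h.2 i hi

theorem pvTable_nonneg (board : List String) (n dr dc : Int) (hn : 0 < n) (hd : pvDirOk dr dc) :
    ∀ (fuel i : Nat), (n * n).toNat ≤ i + fuel → 0 ≤ (pvTableB board n dr dc).getD i 0 := by
  intro fuel
  induction fuel with
  | zero =>
    intro i hi
    have : (pvTableB board n dr dc).getD i 0 = 0 := by
      rw [List.getD_eq_getElem?_getD, List.getElem?_eq_none (by rw [pvTableB_length]; omega)]
      rfl
    rw [this]
  | succ fuel ihf =>
    intro i hi
    rcases Nat.lt_or_ge i ((n * n).toNat) with hlt | hge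
    · rw [pvTable_rec board n dr dc hn hd i hlt]
      simp only [pvRecRHS]
      split_ifs with hp hok
      · have hnb := pvNext_bounds n dr dc (i : Int) hn hd (by positivity)
          hok.1 hok.2.1 hok.2.2.1 hok.2.2.2.1
        have := ihf ((((PySem.Int.floordiv (i : Int) n + dr) * n +
          (PySem.Int.mod (i : Int) n + dc))).toNat) (by omega)
        omega
      · omega
      · simp
    · have : (pvTableB board n dr dc).getD i 0 = 0 := by
        rw [List.getD_eq_getElem?_getD, List.getElem?_eq_none (by rw [pvTableB_length]; omega)]
        rfl
      rw [this]

-- the table entry at a player cell is ≥ m iff the next m-1 cells in the direction all match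
theorem pvTable_ge_iff (board : List String) (n dr dc : Int) (hn : 0 < n) (hd : pvDirOk dr dc) :
    ∀ (m : Nat) (i : Nat), i < (n * n).toNat →
      (PySem.List.pyGet? board (i : Int)).getD "" = "X" ∨
        (PySem.List.pyGet? board (i : Int)).getD "" = "O" →
      ((m : Int) ≤ (pvTableB board n dr dc).getD i 0 ↔
        ∀ k : Int, 1 ≤ k → k < (m : Int) →
          pvGood board n (PySem.Int.floordiv (i : Int) n) (PySem.Int.mod (i : Int) n) dr dc
            ((PySem.List.pyGet? board (i : Int)).getD "") k) := by
  intro m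
  induction m with
  | zero =>
    intro i hi _
    constructor
    · intro _ k hk1 hk0
      exact absurd hk0 (by push_cast; omega)
    · intro _
      exact pvTable_nonneg board n dr dc hn hd ((n * n).toNat) i (by omega)
  | succ m ihm =>
    intro i hi hp
    have hrec := pvTable_rec board n dr dc hn hd i hi
    simp only [pvRecRHS, if_pos hp] at hrec
    set r := PySem.Int.floordiv (i : Int) n with hr
    set c := PySem.Int.mod (i : Int) n with hc
    set cell := (PySem.List.pyGet? board (i : Int)).getD "" with hcell
    by_cases hok : 0 ≤ r + dr ∧ r + dr < n ∧ 0 ≤ c + dc ∧ c + dc < n ∧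
        (PySem.List.pyGet? board ((r + dr) * n + (c + dc))).getD "" = cell
    · rw [if_pos hok] at hrec
      have hnb := pvNext_bounds n dr dc (i : Int) hn hd (by positivity)
        hok.1 hok.2.1 hok.2.2.1 hok.2.2.2.1
      rw [← hr, ← hc] at hnb
      set nxt : Int := (r + dr) * n + (c + dc) with hnxt
      have hnxt0 : 0 ≤ nxt := by omega
      have hcast : ((nxt.toNat : Nat) : Int) = nxt := Int.toNat_of_nonneg hnxt0
      have hnlt : nxt.toNat < (n * n).toNat := by omega
      have hpn : (PySem.List.pyGet? board ((nxt.toNat : Nat) : Int)).getD "" = "X" ∨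
          (PySem.List.pyGet? board ((nxt.toNat : Nat) : Int)).getD "" = "O" := by
        rw [hcast, hok.2.2.2.2]; exact hp
      have hdm := pvDecomp n (r + dr) (c + dc) hn hok.2.2.1 hok.2.2.2.1
      have ihn := ihm nxt.toNat hnlt hpn
      rw [hcast] at ihn
      rw [show PySem.Int.floordiv nxt n = r + dr from by rw [hnxt]; exact hdm.1,
          show PySem.Int.mod nxt n = c + dc from by rw [hnxt]; exact hdm.2,
          hok.2.2.2.2] at ihn
      constructor
      · intro hle k hk1 hkm
        by_cases hk : k = 1
        · subst hk
          unfold pvGood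
          rw [one_mul, one_mul]
          exact ⟨hok.1, hok.2.1, hok.2.2.1, hok.2.2.2.1, hok.2.2.2.2⟩
        · have hk2 : 2 ≤ k := by omega
          have : (m : Int) ≤ (pvTableB board n dr dc).getD nxt.toNat 0 := by omega
          have hg := ihn.mp this (k - 1) (by omega) (by push_cast at hkm ⊢; omega)
          have := (pvGood_shift board n r c dr dc cell (k - 1)).mpr hg
          rwa [show k - 1 + 1 = k from by ring] at this
      · intro hall
        have : (m : Int) ≤ (pvTableB board n dr dc).getD nxt.toNat 0 := by
          rw [ihn]
          intro k hk1 hkm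
          have hg := hall (k + 1) (by omega) (by push_cast; omega)
          exact (pvGood_shift board n r c dr dc cell k).mp hg
        omega
    · rw [if_neg hok] at hrec
      by_cases hm : m = 0
      · subst hm
        constructor
        · intro _ k hk1 hk0
          exact absurd hk0 (by push_cast; omega)
        · intro _; rw [hrec]; norm_num
      · rw [hrec]
        constructor
        · intro h
          exact absurd h (by push_cast; omega)
        · intro hall
          exfalso
          have hg := hall 1 le_rfl (by push_cast; omega)
          unfold pvGood at hg
          rw [one_mul, one_mul] at hg
          exact hok ⟨hg.1, hg.2.1, hg.2.2.1, hg.2.2.2.1, hg.2.2.2.2⟩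

theorem pvWhileA_some (board : List String) (n L r c dr dc : Int) (cell : String) :
    ∀ (fuel : Nat) (cnt : Int), 1 ≤ cnt → cnt < L → (L - cnt).toNat ≤ fuel →
    (∀ k, cnt ≤ k → k < L → pvGood board n r c dr dc cell k) →
    pvWhileA board n L cell dr dc fuel cnt (r + cnt * dr) (c + cnt * dc) = some cell := by
  intro fuel
  induction fuel with
  | zero => intro cnt h1 h2 h3 _; omega
  | succ fuel ih =>
    intro cnt h1 h2 h3 hall
    have hg : pvGood board n r c dr dc cell cnt := hall cnt le_rfl h2
    rw [pvGood] at hg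
    rw [pvWhileA, if_pos hg]
    by_cases hL : L ≤ cnt + 1
    · rw [if_pos hL]
    · rw [if_neg hL]
      have e1 : r + cnt * dr + dr = r + (cnt + 1) * dr := by ring
      have e2 : c + cnt * dc + dc = c + (cnt + 1) * dc := by ring
      rw [e1, e2]
      exact ih (cnt + 1) (by omega) (by omega) (by omega)
        (fun k hk1 hk2 => hall k (by omega) hk2)

theorem pvWhileA_none (board : List String) (n L r c dr dc : Int) (cell : String) :
    ∀ (fuel : Nat) (cnt k0 : Int), 1 ≤ cnt → cnt ≤ k0 → k0 < L →
    ¬ pvGood board n r c dr dc cell k0 →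
    (∀ k, cnt ≤ k → k < k0 → pvGood board n r c dr dc cell k) →
    (k0 - cnt).toNat < fuel →
    pvWhileA board n L cell dr dc fuel cnt (r + cnt * dr) (c + cnt * dc) = none := by
  intro fuel
  induction fuel with
  | zero => intro cnt k0 _ _ _ _ _ h; omega
  | succ fuel ih =>
    intro cnt k0 h1 h2 h3 hbad hgood hf
    by_cases heq : cnt = k0
    · subst heq
      rw [pvGood] at hbad
      rw [pvWhileA, if_neg hbad]
    · have hg : pvGood board n r c dr dc cell cnt := hgood cnt le_rfl (by omega)
      rw [pvGood] at hg
      rw [pvWhileA, if_pos hg, if_neg (by omega)]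
      have e1 : r + cnt * dr + dr = r + (cnt + 1) * dr := by ring
      have e2 : c + cnt * dc + dc = c + (cnt + 1) * dc := by ring
      rw [e1, e2]
      exact ih (cnt + 1) k0 (by omega) (by omega) h3 hbad
        (fun k hk1 hk2 => hgood k (by omega) hk2) (by omega)

theorem pvWhileA_of_all (board : List String) (n L r c dr dc : Int) (cell : String)
    (hL : 2 ≤ L)
    (hall : ∀ k : Int, 1 ≤ k → k < L → pvGood board n r c dr dc cell k) :
    pvWhileA board n L cell dr dc (L.toNat + n.toNat + 1) 1 (r + dr) (c + dc) = some cell := by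
  have e1 : r + dr = r + 1 * dr := by ring
  have e2 : c + dc = c + 1 * dc := by ring
  rw [e1, e2]
  exact pvWhileA_some board n L r c dr dc cell _ 1 le_rfl (by omega) (by omega) hall

theorem pvWhileA_of_not_all (board : List String) (n L r c dr dc : Int) (cell : String)
    (hL : 2 ≤ L)
    (hnall : ¬ ∀ k : Int, 1 ≤ k → k < L → pvGood board n r c dr dc cell k) :
    pvWhileA board n L cell dr dc (L.toNat + n.toNat + 1) 1 (r + dr) (c + dc) = none := by
  have e1 : r + dr = r + 1 * dr := by ring
  have e2 : c + dc = c + 1 * dc := by ring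
  rw [e1, e2]
  push Not at hnall
  obtain ⟨kw, hkw1, hkwL, hkwbad⟩ := hnall
  haveI : DecidablePred fun j : Nat => ¬ pvGood board n r c dr dc cell (1 + (j : Int)) :=
    fun _ => Classical.dec _
  have hex : ∃ j : Nat, ¬ pvGood board n r c dr dc cell (1 + (j : Int)) := by
    refine ⟨(kw - 1).toNat, ?_⟩
    have e : (1 : Int) + ((kw - 1).toNat : Int) = kw := by omega
    rwa [e]
  set j0 := Nat.find hex with hj0
  set k0 : Int := 1 + (j0 : Int) with hk0
  have hbad : ¬ pvGood board n r c dr dc cell k0 := Nat.find_spec hex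
  have hk0kw : k0 ≤ kw := by
    have := Nat.find_min' hex
      (show ¬ pvGood board n r c dr dc cell (1 + ((kw - 1).toNat : Int)) by
        have e : (1 : Int) + ((kw - 1).toNat : Int) = kw := by omega
        rwa [e])
    omega
  have hk0L : k0 < L := by omega
  have hk01 : 1 ≤ k0 := by omega
  have hmin : ∀ k, 1 ≤ k → k < k0 → pvGood board n r c dr dc cell k := by
    intro k h1 h2
    have hj : (k - 1).toNat < j0 := by omega
    have := Nat.find_min hex hj
    rw [not_not] at this
    have e : (1 : Int) + (((k : Int) - 1).toNat : Int) = k := by omega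
    rwa [e] at this
  exact pvWhileA_none board n L r c dr dc cell _ 1 k0 le_rfl hk01 hk0L hbad
    (fun k hk1 hk2 => hmin k hk1 hk2) (by omega)

-- one direction: A's walk from cell i returns `some cell` exactly when B's table entry reaches L
theorem pvDirTable_eq (board : List String) (n L dr dc : Int) (hn : 0 < n) (hL : 2 ≤ L)
    (hd : pvDirOk dr dc) (i : Nat) (hi : i < (n * n).toNat)
    (hp : (PySem.List.pyGet? board (i : Int)).getD "" = "X" ∨
      (PySem.List.pyGet? board (i : Int)).getD "" = "O") :
    pvWhileA board n L ((PySem.List.pyGet? board (i : Int)).getD "") dr dc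
        (L.toNat + n.toNat + 1) 1
        (PySem.Int.floordiv (i : Int) n + dr) (PySem.Int.mod (i : Int) n + dc) =
      (if L ≤ (pvTableB board n dr dc).getD i 0 then
        some ((PySem.List.pyGet? board (i : Int)).getD "") else none) := by
  have hiff := pvTable_ge_iff board n dr dc hn hd L.toNat i hi hp
  rw [Int.toNat_of_nonneg (by omega : (0 : Int) ≤ L)] at hiff
  by_cases h : L ≤ (pvTableB board n dr dc).getD i 0
  · rw [if_pos h]
    exact pvWhileA_of_all board n L _ _ dr dc _ hL (hiff.mp h)
  · rw [if_neg h]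
    exact pvWhileA_of_not_all board n L _ _ dr dc _ hL (fun hall => h (hiff.mpr hall))

theorem pvCell_eq (board : List String) (n L : Int) (hn : 0 < n) (hL : 2 ≤ L)
    (r c : Int) (hr0 : 0 ≤ r) (hrn : r < n) (hc0 : 0 ≤ c) (hcn : c < n) :
    pvCellA board n L r c =
      pvCellB board L
        ([((0 : Int), (1 : Int)), (1, 0), (1, 1), (1, -1)].map fun d => pvTableB board n d.1 d.2)
        ((r * n + c).toNat) := by
  have hnn : 0 ≤ r * n + c := by positivity
  have hcast : (((r * n + c).toNat : Nat) : Int) = r * n + c := Int.toNat_of_nonneg hnn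
  set i : Nat := (r * n + c).toNat with hidef
  have hdm := pvDecomp n r c hn hc0 hcn
  have hub : r * n ≤ (n - 1) * n := mul_le_mul_of_nonneg_right (by omega) (by omega)
  have hi : i < (n * n).toNat := by
    have : r * n + c < n * n := by nlinarith
    omega
  have hcell : pvAt board n r c = (PySem.List.pyGet? board (i : Int)).getD "" := by
    rw [pvAt, hcast]
  by_cases hp : (PySem.List.pyGet? board (i : Int)).getD "" = "X" ∨
      (PySem.List.pyGet? board (i : Int)).getD "" = "O"
  · have hdr : PySem.Int.floordiv ((i : Nat) : Int) n = r := by rw [hcast]; exact hdm.1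
    have hdc2 : PySem.Int.mod ((i : Nat) : Int) n = c := by rw [hcast]; exact hdm.2
    have d1 := pvDirTable_eq board n L 0 1 hn hL (by left; exact ⟨rfl, rfl⟩) i hi hp
    have d2 := pvDirTable_eq board n L 1 0 hn hL (by right; left; exact ⟨rfl, rfl⟩) i hi hp
    have d3 := pvDirTable_eq board n L 1 1 hn hL (by right; right; left; exact ⟨rfl, rfl⟩) i hi hp
    have d4 := pvDirTable_eq board n L 1 (-1) hn hL (by right; right; right; exact ⟨rfl, rfl⟩) i hi hp
    rw [hdr, hdc2] at d1 d2 d3 d4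
    simp only [pvCellA, pvCellB, pvDirsA, hcell, List.map_cons, List.map_nil,
      List.findSome?_cons, List.findSome?_nil, if_neg (by tauto :
        ¬ ((PySem.List.pyGet? board (i : Int)).getD "" ≠ "X" ∧
           (PySem.List.pyGet? board (i : Int)).getD "" ≠ "O")), if_pos hp]
    simp only [d1, d2, d3, d4]
  · simp only [pvCellA, pvCellB, hcell, if_pos (by tauto :
      (PySem.List.pyGet? board (i : Int)).getD "" ≠ "X" ∧
        (PySem.List.pyGet? board (i : Int)).getD "" ≠ "O"), if_neg hp]

theorem pvFindSome?_congr {α β : Type} (l : List α) (f g : α → Option β)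
    (h : ∀ x ∈ l, f x = g x) : l.findSome? f = l.findSome? g := by
  induction l with
  | nil => rfl
  | cons a t ih =>
    simp only [List.findSome?_cons, h a (List.mem_cons_self)]
    cases g a with
    | some b => rfl
    | none => exact ih fun x hx => h x (List.mem_cons_of_mem _ hx)

theorem pvRange_mul_findSome? {α : Type} (a b : Nat) (f : Nat → Option α) :
    (List.range (a * b)).findSome? f =
      (List.range a).findSome? fun r => (List.range b).findSome? fun c => f (r * b + c) := by
  induction a with
  | zero => simp
  | succ a ih =>
    rw [Nat.succ_mul, List.range_add, List.range_succ, List.findSome?_append,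
      List.findSome?_append, ih, List.findSome?_map]
    simp only [List.findSome?_cons, List.findSome?_nil, Function.comp_def]
    cases List.findSome? (fun c => f (a * b + c)) (List.range b) <;> rfl

theorem pvMain (board : List String) (n L : Int) (hpre : n ≤ 0 ∨ (0 < n ∧ 2 ≤ L)) :
    check_winner_n board n L = check_winner_n_alt board n L := by
  rcases hpre with hn | ⟨hn, hL⟩
  · rw [check_winner_n, check_winner_n_alt, if_pos hn, PySem.List.pyRange_one_eq_nil hn,
      List.findSome?_nil]
  have hn' : 0 ≤ n := le_of_lt hn
  have hnN : ((n.toNat : Int)) = n := Int.toNat_of_nonneg hn'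
  rw [check_winner_n, check_winner_n_alt, if_neg (by omega)]
  have hsq : (n * n).toNat = n.toNat * n.toNat := by
    calc (n * n).toNat = (((n.toNat : Int)) * ((n.toNat : Int))).toNat := by rw [hnN]
    _ = n.toNat * n.toNat := by rw [← Int.natCast_mul, Int.toNat_natCast]
  rw [hsq, PySem.List.pyRange_one 0]
  simp only [sub_zero, zero_add, List.findSome?_map]
  rw [pvRange_mul_findSome? n.toNat n.toNat]
  apply pvFindSome?_congr
  intro r' hr'
  rw [List.mem_range] at hr'
  apply pvFindSome?_congr
  intro c' hc'
  rw [List.mem_range] at hc'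
  have hc := pvCell_eq board n L hn hL (r' : Int) (c' : Int)
    (by positivity) (by omega) (by positivity) (by omega)
  simp only [Function.comp]
  rw [hc]
  have he : ((r' : Int) * n + (c' : Int)) = ((r' * n.toNat + c' : Nat) : Int) := by
    push_cast [hnN]; ring
  rw [he, Int.toNat_natCast]

-- ===== VERDICT (by name: the statement is the Claim_ definition above) =====
theorem check_winner_n_spec : Claim_equal_check_winner_n := by
  intro board n L _hdom hpre
  show check_winner_n board n L = check_winner_n_alt board n L
  refine pvMain board n L ?_
  rcases hpre with h | ⟨h1, _, h3⟩
  · exact Or.inl h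
  · exact Or.inr ⟨h1, h3⟩
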